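-- pv_equiv track=rewrite | github.com/Andre-Zred/AlgoritmoDeBuscaEmProfundidade | ProblemaDosCanibaisEMissionarios 2.0.1.py | deslocarCanoa
-- ===== SOURCE A (Python) =====
-- def deslocarCanoa(estadoAtual, numeroMissionario = 0, numeroCanibais = 0):
--
--     if numeroCanibais + numeroMissionario > 2 :
--         return
--     if estadoAtual[-1] == 0 :
--
--         missionarioOrigem = 0
--         CanibaisOrigem = 1
--         missionarioDestino = 2
--         canibaisDestino = 3
--
--     else:
--         missionarioOrigem = 2
--         CanibaisOrigem = 3
--         missionarioDestino = 0
--         canibaisDestino = 1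
--
--     if(estadoAtual[missionarioOrigem] ==  0 and estadoAtual[CanibaisOrigem] ==0):
--         return
--
--     estadoAtual[-1] = 1 - estadoAtual[-1]
--
--     for i in range(min(numeroMissionario,estadoAtual[missionarioOrigem])):
--         estadoAtual[missionarioOrigem] -=1
--         estadoAtual[missionarioDestino] +=1
--
--     for i in range(min(numeroCanibais,estadoAtual[CanibaisOrigem])):
--         estadoAtual[CanibaisOrigem] -=1
--         estadoAtual[canibaisDestino] +=1
--
--     return estadoAtual
-- ===== SOURCE B (Python) =====
-- def deslocarCanoa(estadoAtual, numeroMissionario = 0, numeroCanibais = 0):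
--     if numeroCanibais + numeroMissionario > 2:
--         return
--     if estadoAtual[-1] == 0:
--         missionarioOrigem, CanibaisOrigem, missionarioDestino, canibaisDestino = 0, 1, 2, 3
--     else:
--         missionarioOrigem, CanibaisOrigem, missionarioDestino, canibaisDestino = 2, 3, 0, 1
--     if estadoAtual[missionarioOrigem] == 0 and estadoAtual[CanibaisOrigem] == 0:
--         return
--     estadoAtual[-1] = 1 - estadoAtual[-1]
--     movM = max(0, min(numeroMissionario, estadoAtual[missionarioOrigem]))
--     if movM:
--         estadoAtual[missionarioOrigem] -= movM
--         estadoAtual[missionarioDestino] += movM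
--     movC = max(0, min(numeroCanibais, estadoAtual[CanibaisOrigem]))
--     if movC:
--         estadoAtual[CanibaisOrigem] -= movC
--         estadoAtual[canibaisDestino] += movC
--     return estadoAtual
-- ===== Notes on version B (the rewrite author's own statement) =====
-- stated objective: simpler
-- what changed: The two per-person transfer loops are replaced by closed-form arithmetic: movM = max(0, min(numeroMissionario, origin)) is subtracted from the origin and added to the destination in one step when positive (same for cannibals); guards, index assignment and the boat toggle are unchanged.
import Mathlib
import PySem

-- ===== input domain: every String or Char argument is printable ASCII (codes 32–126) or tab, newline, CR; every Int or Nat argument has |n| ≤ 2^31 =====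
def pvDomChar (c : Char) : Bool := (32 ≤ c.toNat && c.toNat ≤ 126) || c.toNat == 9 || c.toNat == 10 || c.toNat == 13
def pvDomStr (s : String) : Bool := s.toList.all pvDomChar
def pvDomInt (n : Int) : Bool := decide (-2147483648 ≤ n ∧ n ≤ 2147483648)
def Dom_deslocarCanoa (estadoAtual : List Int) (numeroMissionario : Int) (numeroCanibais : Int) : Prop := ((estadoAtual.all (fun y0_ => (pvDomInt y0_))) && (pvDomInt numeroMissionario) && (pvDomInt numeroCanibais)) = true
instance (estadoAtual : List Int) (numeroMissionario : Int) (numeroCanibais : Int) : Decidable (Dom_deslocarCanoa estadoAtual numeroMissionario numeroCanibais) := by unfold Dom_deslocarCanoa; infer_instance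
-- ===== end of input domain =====

-- B replaces A's two per-person transfer loops by closed-form arithmetic (one clamped
-- subtraction/addition per pair of cells, skipped when the clamped amount is zero, exactly
-- where A's loop runs zero times); guards, index choice and the boat toggle are unchanged.
-- Both Pythons mutate the list in place; the equivalence proved here is about the return value.

-- ===== PORT A =====
-- one iteration of A's transfer loop: estadoAtual[a] -= 1; estadoAtual[b] += 1
-- (pyGetD/pySetD are the total forms of Python indexing; Pre_ keeps every access in range)
def pyStepA (a b : Int) (e : List Int) : List Int :=
  PySem.List.pySetD (PySem.List.pySetD e a (PySem.List.pyGetD e a 0 - 1)) b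
    (PySem.List.pyGetD (PySem.List.pySetD e a (PySem.List.pyGetD e a 0 - 1)) b 0 + 1)

def deslocarCanoa (estadoAtual : List Int) (numeroMissionario : Int) (numeroCanibais : Int) : Option (List Int) :=
  if numeroCanibais + numeroMissionario > 2 then none
  else
    let idx : Int × Int × Int × Int :=
      if PySem.List.pyGetD estadoAtual (-1) 0 = 0 then (0, 1, 2, 3) else (2, 3, 0, 1)
    let mo := idx.1
    let co := idx.2.1
    let md := idx.2.2.1
    let cd := idx.2.2.2
    if PySem.List.pyGetD estadoAtual mo 0 = 0 ∧ PySem.List.pyGetD estadoAtual co 0 = 0 then none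
    else
      let e1 := PySem.List.pySetD estadoAtual (-1) (1 - PySem.List.pyGetD estadoAtual (-1) 0)
      let e2 := (PySem.List.pyRange 0 (min numeroMissionario (PySem.List.pyGetD e1 mo 0)) 1).foldl
                  (fun e _ => pyStepA mo md e) e1
      let e3 := (PySem.List.pyRange 0 (min numeroCanibais (PySem.List.pyGetD e2 co 0)) 1).foldl
                  (fun e _ => pyStepA co cd e) e2
      some e3

-- ===== PORT B =====
def deslocarCanoa_alt (estadoAtual : List Int) (numeroMissionario : Int) (numeroCanibais : Int) : Option (List Int) :=
  if numeroCanibais + numeroMissionario > 2 then none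
  else
    let idx : Int × Int × Int × Int :=
      if PySem.List.pyGetD estadoAtual (-1) 0 = 0 then (0, 1, 2, 3) else (2, 3, 0, 1)
    let mo := idx.1
    let co := idx.2.1
    let md := idx.2.2.1
    let cd := idx.2.2.2
    if PySem.List.pyGetD estadoAtual mo 0 = 0 ∧ PySem.List.pyGetD estadoAtual co 0 = 0 then none
    else
      let e1 := PySem.List.pySetD estadoAtual (-1) (1 - PySem.List.pyGetD estadoAtual (-1) 0)
      let movM := max 0 (min numeroMissionario (PySem.List.pyGetD e1 mo 0))
      let e3 := if movM > 0 then
          PySem.List.pySetD (PySem.List.pySetD e1 mo (PySem.List.pyGetD e1 mo 0 - movM)) md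
            (PySem.List.pyGetD (PySem.List.pySetD e1 mo (PySem.List.pyGetD e1 mo 0 - movM)) md 0 + movM)
        else e1
      let movC := max 0 (min numeroCanibais (PySem.List.pyGetD e3 co 0))
      let e5 := if movC > 0 then
          PySem.List.pySetD (PySem.List.pySetD e3 co (PySem.List.pyGetD e3 co 0 - movC)) cd
            (PySem.List.pyGetD (PySem.List.pySetD e3 co (PySem.List.pyGetD e3 co 0 - movC)) cd 0 + movC)
        else e3
      some e5

-- ===== PRECONDITION & SPEC =====
-- Pre_ excludes exactly the inputs on which A raises IndexError (an empty or too-short list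
-- reached past the people-count guard): lists of length ≥ 4 always return, and the only
-- shorter lists on which A returns are those where every early return or zero-iteration
-- loop fires before an out-of-range index is touched — spelled out per length below.
def Pre_deslocarCanoa (estadoAtual : List Int) (numeroMissionario : Int) (numeroCanibais : Int) : Prop :=
  numeroCanibais + numeroMissionario > 2 ∨ 4 ≤ estadoAtual.length ∨
    (estadoAtual.length = 2 ∧ estadoAtual.getD 1 0 = 0 ∧
      (estadoAtual.getD 0 0 = 0 ∨ (min numeroMissionario (estadoAtual.getD 0 0) ≤ 0 ∧ numeroCanibais ≤ 0))) ∨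
    (estadoAtual.length = 3 ∧ estadoAtual.getD 2 0 = 0 ∧
      ((estadoAtual.getD 0 0 = 0 ∧ estadoAtual.getD 1 0 = 0) ∨ min numeroCanibais (estadoAtual.getD 1 0) ≤ 0))
instance (estadoAtual : List Int) (numeroMissionario : Int) (numeroCanibais : Int) : Decidable (Pre_deslocarCanoa estadoAtual numeroMissionario numeroCanibais) := by unfold Pre_deslocarCanoa; infer_instance
def pvWitness_deslocarCanoa : List Int × Int × Int := ([3, 3, 0, 0, 0], 1, 1)

def Spec_deslocarCanoa (estadoAtual : List Int) (numeroMissionario : Int) (numeroCanibais : Int) (out : Option (List Int)) : Prop := out = deslocarCanoa_alt estadoAtual numeroMissionario numeroCanibais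
instance (estadoAtual : List Int) (numeroMissionario : Int) (numeroCanibais : Int) (out : Option (List Int)) : Decidable (Spec_deslocarCanoa estadoAtual numeroMissionario numeroCanibais out) := by unfold Spec_deslocarCanoa; infer_instance

-- ===== CLAIM (what is proved, stated in full; the proofs are below) =====
def Claim_equal_deslocarCanoa : Prop := ∀ (estadoAtual : List Int) (numeroMissionario : Int) (numeroCanibais : Int), Dom_deslocarCanoa estadoAtual numeroMissionario numeroCanibais → Pre_deslocarCanoa estadoAtual numeroMissionario numeroCanibais → Spec_deslocarCanoa estadoAtual numeroMissionario numeroCanibais (deslocarCanoa estadoAtual numeroMissionario numeroCanibais)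

-- ===== LEMMAS AND PROOFS =====

-- a fold whose body ignores the list element is an iterate
theorem foldl_const_iterate {α β : Type} (f : α → α) (l : List β) (e : α) :
    l.foldl (fun x _ => f x) e = f^[l.length] e := by
  induction l generalizing e with
  | nil => rfl
  | cons x t ih => simp [List.foldl_cons, ih, Function.iterate_succ_apply]

-- n iterations of A's loop body transfer n units from cell a to cell b
theorem iterate_pyStepA (a b : Nat) (n : Nat) :
    ∀ (e : List Int), a < e.length → b < e.length → a ≠ b →
    (pyStepA (a : Int) (b : Int))^[n] e
      = (e.set a (e.getD a 0 - n)).set b (e.getD b 0 + n) := by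
  induction n with
  | zero =>
      intro e ha hb _
      simp [List.getD_eq_getElem?_getD, ha, hb]
  | succ n ih =>
      intro e ha hb hab
      rw [Function.iterate_succ_apply]
      have hstep : pyStepA (a : Int) (b : Int) e
          = (e.set a (e.getD a 0 - 1)).set b (e.getD b 0 + 1) := by
        simp [pyStepA, PySem.List.pySetD_natCast, PySem.List.pyGetD_natCast,
          List.getD_eq_getElem?_getD, List.getElem?_set_ne hab]
      rw [hstep, ih _ (by simpa using ha) (by simpa using hb) hab]
      simp only [List.getD_eq_getElem?_getD]
      have h1 : ((e.set a (e[a]?.getD 0 - 1)).set b (e[b]?.getD 0 + 1))[a]?.getD 0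
          = e[a]?.getD 0 - 1 := by
        rw [List.getElem?_set_ne (Ne.symm hab), List.getElem?_set_self ha]; rfl
      have h2 : ((e.set a (e[a]?.getD 0 - 1)).set b (e[b]?.getD 0 + 1))[b]?.getD 0
          = e[b]?.getD 0 + 1 := by
        rw [List.getElem?_set_self (by simpa using hb)]; rfl
      rw [h1, h2, List.set_comm _ _ (Ne.symm hab), List.set_set, List.set_set]
      have ea : e[a]?.getD 0 - 1 - (n : Int) = e[a]?.getD 0 - ((n + 1 : Nat) : Int) := by
        push_cast; ring
      have eb : e[b]?.getD 0 + 1 + (n : Int) = e[b]?.getD 0 + ((n + 1 : Nat) : Int) := by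
        push_cast; ring
      rw [ea, eb]

-- pyStepA preserves the length, hence so does the whole counting loop
theorem foldl_pyStepA_length (a b : Int) (l : List Int) (e : List Int) :
    (l.foldl (fun e _ => pyStepA a b e) e).length = e.length := by
  induction l generalizing e with
  | nil => rfl
  | cons x t ih =>
      rw [List.foldl_cons, ih]
      simp [pyStepA, PySem.List.length_pySetD]

-- A's whole counting loop, in B's guarded closed form
theorem loopB (a b : Nat) (k : Int) (e : List Int)
    (ha : 0 < k → a < e.length) (hb : 0 < k → b < e.length) (hab : a ≠ b) :
    (PySem.List.pyRange 0 k 1).foldl (fun e _ => pyStepA (a : Int) (b : Int) e) e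
      = if max 0 k > 0 then
          PySem.List.pySetD
            (PySem.List.pySetD e (a : Int) (PySem.List.pyGetD e (a : Int) 0 - max 0 k))
            (b : Int)
            (PySem.List.pyGetD
              (PySem.List.pySetD e (a : Int) (PySem.List.pyGetD e (a : Int) 0 - max 0 k)) (b : Int) 0
              + max 0 k)
        else e := by
  by_cases hk : 0 < k
  · rw [if_pos (by omega)]
    rw [foldl_const_iterate, PySem.List.length_pyRange_one,
        iterate_pyStepA a b _ e (ha hk) (hb hk) hab]
    have hkc : (((k - 0).toNat : Nat) : Int) = max 0 k := by omega
    simp only [PySem.List.pySetD_natCast, PySem.List.pyGetD_natCast,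
      List.getD_eq_getElem?_getD, hkc, List.getElem?_set_ne hab]
  · rw [if_neg (by omega), PySem.List.pyRange_one_eq_nil (by omega)]
    rfl

-- ===== VERDICT (by name: the statement is the Claim_ definition above) =====
theorem deslocarCanoa_spec : Claim_equal_deslocarCanoa := by
  intro est nm nc _ hpre
  unfold Spec_deslocarCanoa deslocarCanoa deslocarCanoa_alt
  by_cases hsum : nc + nm > 2
  · simp [hsum]
  · simp only [if_neg hsum]
    rcases hpre with h | hlen | ⟨h2, hy, hw⟩ | ⟨h3, hz, hw⟩
    · omega
    · -- main case: the list has at least 4 cells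
      have hl1 : ∀ v : Int, (PySem.List.pySetD est (-1) v).length = est.length :=
        fun v => PySem.List.length_pySetD _ _ _
      by_cases hbr : PySem.List.pyGetD est (-1) 0 = 0
      · simp only [hbr, if_true]
        by_cases hg : PySem.List.pyGetD est 0 0 = 0 ∧ PySem.List.pyGetD est 1 0 = 0
        · simp [hg]
        · simp only [if_neg hg]
          set e1 := PySem.List.pySetD est (-1) (1 - 0) with he1
          have H1 := loopB 0 2 (min nm (PySem.List.pyGetD e1 0 0)) e1
            (fun _ => by rw [he1, hl1]; omega) (fun _ => by rw [he1, hl1]; omega) (by decide)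
          simp only [Nat.cast_zero, Nat.cast_ofNat] at H1
          set E2 := (PySem.List.pyRange 0 (min nm (PySem.List.pyGetD e1 0 0)) 1).foldl
            (fun e _ => pyStepA 0 2 e) e1 with hE2
          have hE2len : E2.length = est.length := by
            rw [hE2, foldl_pyStepA_length, he1, hl1]
          have H2 := loopB 1 3 (min nc (PySem.List.pyGetD E2 1 0)) E2
            (fun _ => by rw [hE2len]; omega) (fun _ => by rw [hE2len]; omega) (by decide)
          simp only [Nat.cast_one, Nat.cast_ofNat] at H2
          rw [H2, H1]
      · simp only [hbr, if_false]
        by_cases hg : PySem.List.pyGetD est 2 0 = 0 ∧ PySem.List.pyGetD est 3 0 = 0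
        · simp [hg]
        · simp only [if_neg hg]
          set e1 := PySem.List.pySetD est (-1) (1 - PySem.List.pyGetD est (-1) 0) with he1
          have H1 := loopB 2 0 (min nm (PySem.List.pyGetD e1 2 0)) e1
            (fun _ => by rw [he1, hl1]; omega) (fun _ => by rw [he1, hl1]; omega) (by decide)
          simp only [Nat.cast_zero, Nat.cast_ofNat] at H1
          set E2 := (PySem.List.pyRange 0 (min nm (PySem.List.pyGetD e1 2 0)) 1).foldl
            (fun e _ => pyStepA 2 0 e) e1 with hE2
          have hE2len : E2.length = est.length := by
            rw [hE2, foldl_pyStepA_length, he1, hl1]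
          have H2 := loopB 3 1 (min nc (PySem.List.pyGetD E2 3 0)) E2
            (fun _ => by rw [hE2len]; omega) (fun _ => by rw [hE2len]; omega) (by decide)
          simp only [Nat.cast_one, Nat.cast_ofNat] at H2
          rw [H2, H1]
    · -- length-2 case
      obtain ⟨x, y, rfl⟩ := List.length_eq_two.mp h2
      have hy0 : y = 0 := by simpa using hy
      subst hy0
      have hbr : PySem.List.pyGetD [x, 0] (-1) 0 = 0 := rfl
      simp only [hbr, if_true]
      simp only [List.getD] at hw
      by_cases hx : x = 0
      · subst hx
        rw [if_pos ⟨rfl, rfl⟩, if_pos ⟨rfl, rfl⟩]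
      · have hg : ¬ (PySem.List.pyGetD [x, 0] 0 0 = 0 ∧ PySem.List.pyGetD [x, 0] 1 0 = 0) := by
          intro hh; exact hx hh.1
        simp only [if_neg hg]
        rcases hw with hw | ⟨hmin, hnc⟩
        · exact absurd (by simpa using hw) hx
        · have he1 : PySem.List.pySetD [x, 0] (-1) (1 - 0) = [x, 1] := rfl
          rw [he1]
          have hg0 : PySem.List.pyGetD [x, 1] 0 0 = x := rfl
          rw [hg0]
          have hmx : min nm x ≤ 0 := by simpa using hmin
          rw [PySem.List.pyRange_one_eq_nil (by omega), List.foldl_nil,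
              if_neg (by omega)]
          have hg1 : PySem.List.pyGetD [x, 1] 1 0 = 1 := rfl
          rw [hg1]
          rw [PySem.List.pyRange_one_eq_nil (by omega), List.foldl_nil,
              if_neg (by omega)]
    · -- length-3 case
      obtain ⟨x, y, z, rfl⟩ := List.length_eq_three.mp h3
      have hz0 : z = 0 := by simpa using hz
      subst hz0
      have hbr : PySem.List.pyGetD [x, y, 0] (-1) 0 = 0 := rfl
      simp only [hbr, if_true]
      simp only [List.getD] at hw
      by_cases hg : PySem.List.pyGetD [x, y, 0] 0 0 = 0 ∧ PySem.List.pyGetD [x, y, 0] 1 0 = 0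
      · rw [if_pos hg, if_pos hg]
      · simp only [if_neg hg]
        have hxy : ¬ (x = 0 ∧ y = 0) := by
          intro hh; exact hg ⟨hh.1, hh.2⟩
        have hmc : min nc y ≤ 0 := by
          rcases hw with hw0 | hw1
          · exact absurd ⟨by simpa using hw0.1, by simpa using hw0.2⟩ hxy
          · simpa using hw1
        have he1 : PySem.List.pySetD [x, y, 0] (-1) (1 - 0) = [x, y, 1] := rfl
        rw [he1]
        have hg0 : PySem.List.pyGetD [x, y, 1] 0 0 = x := rfl
        rw [hg0]
        have H1 := loopB 0 2 (min nm x) [x, y, 1]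
          (fun _ => by simp) (fun _ => by simp) (by decide)
        simp only [Nat.cast_zero, Nat.cast_ofNat] at H1
        rw [H1]
        by_cases hm : max 0 (min nm x) > 0
        · rw [if_pos hm, if_pos hm]
          have hS : PySem.List.pySetD
              (PySem.List.pySetD [x, y, 1] 0 (PySem.List.pyGetD [x, y, 1] 0 0 - max 0 (min nm x))) 2
              (PySem.List.pyGetD
                (PySem.List.pySetD [x, y, 1] 0 (PySem.List.pyGetD [x, y, 1] 0 0 - max 0 (min nm x))) 2 0
                + max 0 (min nm x))
              = [x - max 0 (min nm x), y, 1 + max 0 (min nm x)] := rfl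
          rw [hS]
          have hgyA : PySem.List.pyGetD [x - max 0 (min nm x), y, 1 + max 0 (min nm x)] 1 0 = y := rfl
          have hgyB : PySem.List.pyGetD
              (PySem.List.pySetD (PySem.List.pySetD [x, y, 1] 0 (x - max 0 (min nm x))) 2
                (PySem.List.pyGetD (PySem.List.pySetD [x, y, 1] 0 (x - max 0 (min nm x))) 2 0
                  + max 0 (min nm x))) 1 0 = y := rfl
          rw [hgyA, hgyB]
          rw [PySem.List.pyRange_one_eq_nil (by omega), List.foldl_nil, if_neg (by omega)]
          rfl
        · rw [if_neg hm, if_neg hm]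
          have hgy : PySem.List.pyGetD [x, y, 1] 1 0 = y := rfl
          rw [hgy]
          rw [PySem.List.pyRange_one_eq_nil (by omega), List.foldl_nil, if_neg (by omega)]

-- (end)
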